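-- pv_equiv track=rewrite | github.com/HerlockSholmesm/floating_point_verilog | sqrt/GOlden model/SQRT_Golden_Model.py | integer_square
-- ===== SOURCE A (Python) =====
-- import math
--
-- MANTIS_SIZE = 23
--
-- def integer_square(d):  # non restoring algorithm
--     r = 0
--     q = 0
--
--     result_bits = (int(math.log2(d)) + 1) // 2 + 1
--
--     for i in range(result_bits - 1, -1, -1):
--
--         if r >= 0:
--             r = (r << 2) | ((d >> (i + i)) & 3)
--             r = r - ((q << 2) | 1)
--         else:
--             r = (r << 2) | ((d >> (i + 1)) & 3)
--             r = r + ((q << 2) | 3)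
--
--         if r >= 0:
--             q = ((q << 1) | 1)
--         else:
--             q = ((q << 1) | 0)
--
--         if r < 0:
--             r = r + ((q << 1) | 1)
--     length = int(math.log2(q))
--     zero_extend = MANTIS_SIZE - length
--     result = str(bin(q))[3:] + '0' * zero_extend
--     return result
-- ===== SOURCE B (Python) =====
-- import math
--
-- MANTIS_SIZE = 23
--
-- def integer_square(d):
--     # closed-form integer square root instead of the bit-by-bit non-restoring loop
--     q = math.isqrt(d)
--     length = int(math.log2(q))
--     zero_extend = MANTIS_SIZE - length
--     return bin(q)[3:] + '0' * zero_extend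
-- ===== Notes on version B (the rewrite author's own statement) =====
-- stated objective: simpler
-- what changed: The whole non-restoring bit loop (r/q/result_bits machinery) is replaced by a single math.isqrt call; the formatting tail is kept verbatim.
import Mathlib
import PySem

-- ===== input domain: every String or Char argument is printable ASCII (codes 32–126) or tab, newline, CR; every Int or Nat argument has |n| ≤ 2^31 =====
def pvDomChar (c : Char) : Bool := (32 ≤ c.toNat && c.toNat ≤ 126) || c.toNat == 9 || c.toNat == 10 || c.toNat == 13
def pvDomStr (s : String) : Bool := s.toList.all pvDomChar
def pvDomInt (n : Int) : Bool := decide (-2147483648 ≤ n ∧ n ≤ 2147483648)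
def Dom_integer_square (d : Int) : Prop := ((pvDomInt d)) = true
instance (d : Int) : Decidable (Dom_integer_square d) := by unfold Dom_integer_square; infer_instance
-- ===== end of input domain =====

-- B replaces A's non-restoring bit loop by a single integer-square-root call; the formatting tail is identical.

-- ===== PORT A =====
-- one loop iteration of A's non-restoring algorithm; `x << k | m` with the low k bits zero is
-- x * 2^k + m, `>>` is floor division by a power of two, `& 3` on a nonnegative value is mod 4
def isqStep (d : Int) (rq : Int × Int) (i : Int) : Int × Int :=
  let r := rq.1
  let q := rq.2
  let r := if 0 ≤ r then
      4 * r + PySem.Int.mod (PySem.Int.floordiv d (2 ^ (i + i).toNat)) 4 - (4 * q + 1)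
    else
      4 * r + PySem.Int.mod (PySem.Int.floordiv d (2 ^ (i + 1).toNat)) 4 + (4 * q + 3)
  let q := if 0 ≤ r then 2 * q + 1 else 2 * q
  let r := if r < 0 then r + (2 * q + 1) else r
  (r, q)

-- int(math.log2(x)) is ported as bitLength x - 1: exact for 1 ≤ x ≤ 2^31 (the double log2
-- never rounds across an integer there); A raises ValueError for d ≤ 0 (excluded by Pre_)
def integer_square (d : Int) : String :=
  let result_bits : Int := PySem.Int.floordiv (((PySem.Int.bitLength d : Int) - 1) + 1) 2 + 1
  let rq := (PySem.List.pyRange (result_bits - 1) (-1) (-1)).foldl (isqStep d) (0, 0)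
  let q := rq.2
  let length : Int := (PySem.Int.bitLength q : Int) - 1
  let zero_extend : Int := 23 - length
  String.ofList (PySem.List.slice (PySem.Int.toBinChars0b q) (some 3) none ++
    PySem.List.pyRepeat ['0'] zero_extend)

-- ===== PORT B =====
-- math.isqrt(d) → Nat.sqrt (raises for d < 0, and log2(0) raises at d = 0: excluded by Pre_)
def integer_square_alt (d : Int) : String :=
  let q : Int := (Nat.sqrt d.toNat : Int)
  let length : Int := (PySem.Int.bitLength q : Int) - 1
  let zero_extend : Int := 23 - length
  String.ofList (PySem.List.slice (PySem.Int.toBinChars0b q) (some 3) none ++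
    PySem.List.pyRepeat ['0'] zero_extend)

-- ===== PRECONDITION & SPEC =====
-- Pre_ excludes exactly d ≤ 0, where both Pythons raise ValueError (math.log2 / math.isqrt)
def Pre_integer_square (d : Int) : Prop := 1 ≤ d
instance (d : Int) : Decidable (Pre_integer_square d) := by unfold Pre_integer_square; infer_instance
def pvWitness_integer_square : Int := (9)

def Spec_integer_square (d : Int) (out : String) : Prop := out = integer_square_alt d
instance (d : Int) (out : String) : Decidable (Spec_integer_square d out) := by unfold Spec_integer_square; infer_instance

-- ===== CLAIM (what is proved, stated in full; the proofs are below) =====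
def Claim_equal_integer_square : Prop := ∀ (d : Int), Dom_integer_square d → Pre_integer_square d → Spec_integer_square d (integer_square d)

-- ===== LEMMAS AND PROOFS =====

-- loop invariant: processing indices k-1 … 0 from a state with r = n/4^k - q², 0 ≤ r ≤ 2q
-- ends in a state whose q is exactly Nat.sqrt n
lemma isq_loop_inv (n : Nat) : ∀ (k : Nat) (q : Nat) (r : Int),
    r = ((n / 4 ^ k : Nat) : Int) - (q : Int) * q → 0 ≤ r → r ≤ 2 * q →
    ((PySem.List.pyRange ((k : Int) - 1) (-1) (-1)).foldl (isqStep (n : Int)) (r, (q : Int))).2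
      = (Nat.sqrt n : Int) := by
  intro k
  induction k with
  | zero =>
    intro q r hr h0 h2
    rw [PySem.List.pyRange_neg_one_eq_nil (by norm_num)]
    simp only [List.foldl_nil]
    simp only [pow_zero, Nat.div_one] at hr
    have h1 : q * q ≤ n := by exact_mod_cast (by linarith [hr ▸ h0] : ((q:Int) * q ≤ n))
    have h3 : n < (q + 1) * (q + 1) := by
      have : (n : Int) < ((q:Int) + 1) * ((q:Int) + 1) := by nlinarith [hr ▸ h2]
      exact_mod_cast this
    have hs1 : q ≤ Nat.sqrt n := Nat.le_sqrt'.mpr (by rw [pow_two]; exact h1)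
    have hs2 : Nat.sqrt n < q + 1 := Nat.sqrt_lt'.mpr (by rw [pow_two]; exact h3)
    have : Nat.sqrt n = q := by omega
    rw [this]
  | succ k ih =>
    intro q r hr h0 h2
    rw [show ((k + 1 : Nat) : Int) - 1 = (k : Int) by push_cast; ring]
    rw [PySem.List.pyRange_neg_one_cons (by omega : (-1 : Int) < (k : Int))]
    simp only [List.foldl_cons]
    set N : Nat := n / 4 ^ k with hN
    set m : Nat := n / 4 ^ (k + 1) with hm
    set t : Nat := N % 4 with htdef
    have hNsplit : 4 * m + t = N := by
      rw [hN, hm, htdef, pow_succ, ← Nat.div_div_eq_div_mul]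
      omega
    have hNdef : (N : Int) = 4 * (m : Int) + (t : Int) := by exact_mod_cast hNsplit.symm
    have ht0 : (0 : Int) ≤ (t : Int) := by positivity
    have ht3 : (t : Int) ≤ 3 := by exact_mod_cast (by omega : t ≤ 3)
    have hrm : r = (m : Int) - (q : Int) * q := hr
    have e1 : PySem.Int.mod (PySem.Int.floordiv (n : Int) (2 ^ (((k : Int) + k).toNat))) 4
        = ((t : Nat) : Int) := by
      have h2k : (((k : Int) + k).toNat) = 2 * k := by omega
      have e2 : ((2 : Int) ^ (2 * k)) = ((4 ^ k : Nat) : Int) := by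
        push_cast; rw [pow_mul]; norm_num
      rw [h2k, e2, PySem.Int.floordiv_natCast, show ((4 : Int)) = ((4 : Nat) : Int) from rfl,
        PySem.Int.mod_natCast, htdef, hN]
    have step_eq : isqStep (n : Int) (r, (q : Int)) (k : Int)
        = (if 0 ≤ 4 * r + ((t : Nat) : Int) - (4 * (q : Int) + 1)
           then (4 * r + ((t : Nat) : Int) - (4 * (q : Int) + 1), ((2 * q + 1 : Nat) : Int))
           else (4 * r + ((t : Nat) : Int) - (4 * (q : Int) + 1) + (4 * (q : Int) + 1),
                 ((2 * q : Nat) : Int))) := by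
      simp only [isqStep, e1]
      rw [if_pos h0]
      by_cases hc : 0 ≤ 4 * r + ((t : Nat) : Int) - (4 * (q : Int) + 1)
      · rw [if_pos hc, if_pos hc, if_neg (not_lt.mpr hc)]
        push_cast; ring_nf
      · rw [if_neg hc, if_neg hc, if_pos (not_le.mp hc)]
        push_cast; ring_nf
    rw [step_eq]
    split_ifs with hc
    · apply ih (2 * q + 1)
      · push_cast
        linear_combination 4 * hrm - hNdef
      · exact hc
      · push_cast
        linarith [hrm, h2, ht3]
    · apply ih (2 * q)
      · push_cast
        linear_combination 4 * hrm - hNdef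
      · linarith [h0, ht0]
      · push_cast
        omega

lemma isq_q_eq (d : Int) (hd : 1 ≤ d) :
    ((PySem.List.pyRange
        ((PySem.Int.floordiv (((PySem.Int.bitLength d : Int) - 1) + 1) 2 + 1) - 1) (-1) (-1)).foldl
      (isqStep d) (0, 0)).2 = (Nat.sqrt d.toNat : Int) := by
  obtain ⟨n, rfl⟩ : ∃ n : Nat, d = (n : Int) := ⟨d.toNat, (Int.toNat_of_nonneg (by omega)).symm⟩
  set B : Nat := PySem.Int.bitLength (n : Int) with hB
  have hrb : PySem.Int.floordiv (((B : Int) - 1) + 1) 2 + 1 = ((B / 2 + 1 : Nat) : Int) := by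
    rw [sub_add_cancel, show ((2 : Int)) = ((2 : Nat) : Int) from rfl, PySem.Int.floordiv_natCast]
    push_cast; ring
  rw [hrb]
  have hlt : n < 4 ^ (B / 2 + 1) := by
    have h1 : n < 2 ^ B := by
      have := PySem.Int.lt_two_pow_bitLength (n : Int)
      simpa [hB] using this
    calc n < 2 ^ B := h1
      _ ≤ 2 ^ (2 * (B / 2) + 2) := Nat.pow_le_pow_right (by norm_num) (by omega)
      _ = 4 ^ (B / 2 + 1) := by
          rw [show (4 : Nat) = 2 ^ 2 from rfl, ← pow_mul]
          ring_nf
  have hmain := isq_loop_inv n (B / 2 + 1) 0 0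
    (by rw [Nat.div_eq_of_lt hlt]; simp) (le_refl 0) (by simp)
  simpa using hmain

-- ===== VERDICT (by name: the statement is the Claim_ definition above) =====
theorem integer_square_spec : Claim_equal_integer_square := by
  intro d _ hd
  show integer_square d = integer_square_alt d
  simp only [integer_square, integer_square_alt, isq_q_eq d hd]
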